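-- pv_equiv track=rewrite | github.com/gabogara/python_session_1_2 | interviews.py | goldilocks_approved
-- ===== SOURCE A (Python) =====
-- def goldilocks_approved(nums):
--     if len(nums) < 3:
--         return -1
--     maximun = max(nums)
--     minimun = min(nums)
--     nums.sort()
--
--     for num in nums:
--         if num > minimun and num < maximun:
--             return num
-- ===== SOURCE B (Python) =====
-- def goldilocks_approved(nums):
--     if len(nums) < 3:
--         return -1
--     lo = min(nums)
--     hi = max(nums)
--     mid = None
--     for x in nums:
--         if lo < x < hi and (mid is None or x < mid):
--             mid = x
--     return mid
-- ===== Notes on version B (the rewrite author's own statement) =====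
-- stated objective: faster
-- what changed: Replaced sort-then-scan (A sorts the list in place and returns the first element strictly between min and max) by a single O(n) pass that keeps the smallest element strictly between min and max; B does not mutate the input.
import Mathlib
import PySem

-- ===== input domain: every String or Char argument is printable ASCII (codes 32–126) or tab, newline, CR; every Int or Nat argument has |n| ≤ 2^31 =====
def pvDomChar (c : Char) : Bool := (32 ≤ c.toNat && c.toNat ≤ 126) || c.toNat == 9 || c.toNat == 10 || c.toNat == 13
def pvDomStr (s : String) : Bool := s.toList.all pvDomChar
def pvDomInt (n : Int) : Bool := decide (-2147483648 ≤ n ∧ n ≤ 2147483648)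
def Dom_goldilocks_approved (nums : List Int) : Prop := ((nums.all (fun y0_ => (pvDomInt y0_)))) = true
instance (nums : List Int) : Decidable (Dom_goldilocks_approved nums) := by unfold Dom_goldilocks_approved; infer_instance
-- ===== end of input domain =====

-- B replaces A's in-place sort + first-match scan by one O(n) pass keeping the smallest
-- element strictly between min and max (equivalence is about the RETURN value only:
-- A sorts `nums` in place, B does not mutate it).

-- ===== PORT A =====
-- A: if len < 3 return -1; else max, min, sort in place, return first element strictly between;
-- falls off the loop (returns None) if there is none.
def goldilocks_approved (nums : List Int) : Option Int :=
  if nums.length < 3 then some (-1)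
  else
    match PySem.List.max? nums (fun x => x), PySem.List.min? nums (fun x => x) with
    | some maximun, some minimun =>
        (PySem.List.sorted nums (fun x => x) false).find?
          (fun num => decide (num > minimun) && decide (num < maximun))
    | _, _ => none   -- unreachable: length ≥ 3, so max/min exist

-- ===== PORT B =====
def goldilocks_approved_alt (nums : List Int) : Option Int :=
  if nums.length < 3 then some (-1)
  else
    match PySem.List.min? nums (fun x => x) with
    | none => none   -- unreachable: length ≥ 3, so min exists
    | some lo =>
      match PySem.List.max? nums (fun x => x) with
      | none => none   -- unreachable: length ≥ 3, so max exists
      | some hi =>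
        nums.foldl (fun mid x =>
          if decide (lo < x) && decide (x < hi) && mid.all (fun m => decide (x < m))
          then some x else mid) none

-- ===== PRECONDITION & SPEC =====
def Spec_goldilocks_approved (nums : List Int) (out : Option Int) : Prop := out = goldilocks_approved_alt nums
instance (nums : List Int) (out : Option Int) : Decidable (Spec_goldilocks_approved nums out) := by unfold Spec_goldilocks_approved; infer_instance

-- ===== CLAIM (what is proved, stated in full; the proofs are below) =====
def Claim_equal_goldilocks_approved : Prop := ∀ (nums : List Int), Dom_goldilocks_approved nums → Spec_goldilocks_approved nums (goldilocks_approved nums)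

-- ===== LEMMAS AND PROOFS =====

-- B's fold only changes state on elements passing the filter p.
theorem pvFold_filter (p : Int → Bool) (l : List Int) (acc : Option Int) :
    l.foldl (fun mid x => if p x && mid.all (fun m => decide (x < m)) then some x else mid) acc
      = (l.filter p).foldl (fun mid x => if mid.all (fun m => decide (x < m)) then some x else mid) acc := by
  induction l generalizing acc with
  | nil => rfl
  | cons x t ih =>
    by_cases hx : p x = true
    · simp only [List.foldl_cons, List.filter_cons, hx, Bool.true_and, if_true]
      exact ih _
    · rw [Bool.not_eq_true] at hx
      simp only [List.foldl_cons, List.filter_cons, hx, Bool.false_and, Bool.false_eq_true,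
        if_false]
      exact ih _

-- the keep-smaller fold, starting from some a, computes the running minimum.
theorem pvFold_min (l : List Int) (a : Int) :
    l.foldl (fun mid x => if mid.all (fun m => decide (x < m)) then some x else mid) (some a)
      = some (l.foldl min a) := by
  induction l generalizing a with
  | nil => rfl
  | cons x t ih =>
    simp only [List.foldl_cons, Option.all_some, decide_eq_true_eq]
    by_cases h : x < a
    · rw [if_pos h, ih, min_eq_right (le_of_lt h)]
    · rw [if_neg h, ih, min_eq_left (not_lt.mp h)]

theorem pvMin?_eq_some_iff (l : List Int) (m : Int) :
    PySem.List.min? l (fun x => x) = some m ↔ m ∈ l ∧ ∀ y ∈ l, m ≤ y := by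
  constructor
  · intro h
    exact ⟨PySem.List.min?_mem h, fun y hy => PySem.List.min?_isMin h y hy⟩
  · rintro ⟨hm, hmin⟩
    cases hl : PySem.List.min? l (fun x => x) with
    | none =>
      rw [PySem.List.min?_eq_none_iff] at hl
      simp [hl] at hm
    | some m' =>
      have h1 : m ≤ m' := hmin m' (PySem.List.min?_mem hl)
      have h2 : m' ≤ m := PySem.List.min?_isMin hl m hm
      exact congrArg some (le_antisymm h2 h1)

-- min? (with identity key) is invariant under permutation.
theorem pvMin?_perm (l l' : List Int) (h : l.Perm l') :
    PySem.List.min? l (fun x => x) = PySem.List.min? l' (fun x => x) := by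
  cases hl : PySem.List.min? l (fun x => x) with
  | none =>
    rw [PySem.List.min?_eq_none_iff] at hl
    subst hl
    have h' : l' = [] := List.perm_nil.mp h.symm
    subst h'
    symm
    rw [PySem.List.min?_eq_none_iff]
  | some m =>
    rw [pvMin?_eq_some_iff] at hl
    symm
    rw [pvMin?_eq_some_iff]
    exact ⟨h.mem_iff.mp hl.1, fun y hy => hl.2 y (h.mem_iff.mpr hy)⟩

theorem pvFoldl_min_of_le (t : List Int) (a : Int) (h : ∀ y ∈ t, a ≤ y) :
    t.foldl min a = a := by
  induction t with
  | nil => rfl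
  | cons x s ih =>
    have hx : a ≤ x := h x (by simp)
    simp only [List.foldl_cons, min_eq_left hx]
    exact ih (fun y hy => h y (by simp [hy]))

-- head of a ≤-sorted list is its min?.
theorem pvHead?_eq_min? (l : List Int) (hp : l.Pairwise (· ≤ ·)) :
    l.head? = PySem.List.min? l (fun x => x) := by
  cases l with
  | nil => rfl
  | cons m t =>
    rw [PySem.List.min?_id_cons]
    have : t.foldl min m = m :=
      pvFoldl_min_of_le t m (fun y hy => (List.pairwise_cons.mp hp).1 y hy)
    simp [this]

-- ===== VERDICT (by name: the statement is the Claim_ definition above) =====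
theorem goldilocks_approved_spec : Claim_equal_goldilocks_approved := by
  intro nums _
  unfold Spec_goldilocks_approved goldilocks_approved goldilocks_approved_alt
  by_cases hlen : nums.length < 3
  · simp [hlen]
  · simp only [if_neg hlen]
    cases hmx : PySem.List.max? nums (fun x => x) with
    | none =>
      rw [PySem.List.max?_eq_none_iff] at hmx
      subst hmx
      exact (hlen (by simp)).elim
    | some hi =>
      cases hmn : PySem.List.min? nums (fun x => x) with
      | none => rfl
      | some lo =>
        show (PySem.List.sorted nums (fun x => x) false).find?
              (fun num => decide (num > lo) && decide (num < hi))
            = nums.foldl (fun mid x =>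
                if decide (lo < x) && decide (x < hi) && mid.all (fun m => decide (x < m))
                then some x else mid) none
        -- predicate of the interval
        set p : Int → Bool := fun num => decide (num > lo) && decide (num < hi) with hp
        have hA : (PySem.List.sorted nums (fun x => x) false).find? p
            = ((PySem.List.sorted nums (fun x => x) false).filter p).head? :=
          (List.head?_filter ..).symm
        have hpb : ∀ (x : Int) (mid : Option Int),
            (decide (lo < x) && decide (x < hi) && mid.all (fun m => decide (x < m)))
              = (p x && mid.all (fun m => decide (x < m))) := by
          intro x mid
          rw [hp]
        have hB : nums.foldl (fun mid x =>
              if decide (lo < x) && decide (x < hi) && mid.all (fun m => decide (x < m))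
              then some x else mid) none
            = PySem.List.min? (nums.filter p) (fun x => x) := by
          have : (fun (mid : Option Int) (x : Int) =>
                if decide (lo < x) && decide (x < hi) && mid.all (fun m => decide (x < m))
                then some x else mid)
              = (fun mid x => if p x && mid.all (fun m => decide (x < m)) then some x else mid) := by
            funext mid x
            rw [hpb]
          rw [this, pvFold_filter]
          cases hf : nums.filter p with
          | nil => rfl
          | cons a t =>
            simp only [List.foldl_cons, Option.all_none, if_true]
            rw [pvFold_min, PySem.List.min?_id_cons]
        have hsortfilter : ((PySem.List.sorted nums (fun x => x) false).filter p).Pairwise (· ≤ ·) :=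
          (PySem.List.sorted_pairwise nums (fun x => x)).filter p
        have hperm : ((PySem.List.sorted nums (fun x => x) false).filter p).Perm (nums.filter p) :=
          (PySem.List.sorted_perm nums (fun x => x) false).filter p
        rw [hA, hB, pvHead?_eq_min? _ hsortfilter]
        exact pvMin?_perm _ _ hperm
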